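-- pv_equiv track=rewrite | github.com/1van101/SoftUni-Fundamentals | python_fundamentals/more_exercises/03_list_basics_more_exercises/list_manipulator.py | get_max_even_or_odd
-- ===== SOURCE A (Python) =====
-- def get_max_even_or_odd(command, list):
--     if "even" in command:
--         even = [x for x in list if x % 2 == 0]
--         if len(even) == 0:
--             return f"No matches"
--         even_max = max(even)
--         for i in range(len(list) - 1, -1, -1):
--             if list[i] == even_max:
--                 return f"{i}"
--
--     else:
--         odd = [x for x in list if x % 2 != 0]
--         if len(odd) == 0:
--             return f"No matches"
--         odd_max = max(odd)
--         for i in range(len(list) - 1, -1, -1):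
--             if list[i] == odd_max:
--                 return f"{i}"
-- ===== SOURCE B (Python) =====
-- def get_max_even_or_odd(command, list):
--     # Single forward pass keeping the running max of the wanted parity and its
--     # latest index (>= so ties keep the LAST occurrence), instead of A's
--     # filter + max + backward scan.
--     want_even = "even" in command
--     best = None  # (value, index)
--     for i, x in enumerate(list):
--         if (x % 2 == 0) == want_even:
--             if best is None or x >= best[0]:
--                 best = (x, i)
--     if best is None:
--         return "No matches"
--     return f"{best[1]}"
-- ===== Notes on version B (the rewrite author's own statement) =====
-- stated objective: simpler
-- what changed: Replaces A's three passes (filter the parity elements, take max, then scan backwards for its index) by one forward pass maintaining the running max and its last index (updating on >=).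
import Mathlib
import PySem

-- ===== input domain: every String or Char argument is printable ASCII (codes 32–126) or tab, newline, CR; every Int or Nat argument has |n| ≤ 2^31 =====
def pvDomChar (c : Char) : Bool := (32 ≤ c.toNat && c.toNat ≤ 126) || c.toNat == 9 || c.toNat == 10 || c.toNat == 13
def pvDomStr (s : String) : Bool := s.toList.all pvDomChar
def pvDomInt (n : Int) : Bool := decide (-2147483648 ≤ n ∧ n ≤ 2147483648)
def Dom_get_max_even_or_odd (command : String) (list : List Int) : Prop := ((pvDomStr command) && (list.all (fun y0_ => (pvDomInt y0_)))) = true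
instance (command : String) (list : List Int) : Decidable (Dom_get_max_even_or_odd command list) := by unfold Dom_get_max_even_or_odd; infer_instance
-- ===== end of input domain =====

-- B replaces A's three passes (filter, max, backward index scan) by a single forward
-- pass keeping the running max of the wanted parity and its last index ('simpler').

-- ===== PORT A =====
-- 'for i in range(len(list)-1, -1, -1): if list[i] == m: return str(i)'.
-- pyGet? = none would be an IndexError, and falling off the loop would return None:
-- both are unreachable here (every generated index is in range and m occurs in list),
-- so the Option result is collapsed with .getD "None" at the call site.
def scanBackA (list : List Int) (m : Int) : List Int → Option String
  | [] => none
  | i :: is =>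
    match PySem.List.pyGet? list i with
    | some v => if v = m then some (PySem.Int.toStr i) else scanBackA list m is
    | none => none

def get_max_even_or_odd (command : String) (list : List Int) : String :=
  if PySem.Str.isIn "even" command then
    let even := list.filter (fun x => PySem.Int.mod x 2 == 0)
    if even.length = 0 then "No matches"
    else
      let even_max := (PySem.List.max? even (fun y => y)).getD 0
      (scanBackA list even_max (PySem.List.pyRange ((list.length : Int) - 1) (-1) (-1))).getD "None"
  else
    let odd := list.filter (fun x => !(PySem.Int.mod x 2 == 0))
    if odd.length = 0 then "No matches"
    else
      let odd_max := (PySem.List.max? odd (fun y => y)).getD 0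
      (scanBackA list odd_max (PySem.List.pyRange ((list.length : Int) - 1) (-1) (-1))).getD "None"

-- ===== PORT B =====
-- one step of the forward loop: state 'best' is None or (value, index)
def stepB (want_even : Bool) (best : Option (Int × Int)) (p : Int × Int) : Option (Int × Int) :=
  if (PySem.Int.mod p.2 2 == 0) == want_even then
    match best with
    | none => some (p.2, p.1)
    | some b => if b.1 ≤ p.2 then some (p.2, p.1) else best
  else best

def get_max_even_or_odd_alt (command : String) (list : List Int) : String :=
  let want_even := PySem.Str.isIn "even" command
  match (PySem.List.enumerate list).foldl (stepB want_even) none with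
  | none => "No matches"
  | some b => PySem.Int.toStr b.2

-- ===== PRECONDITION & SPEC =====
def Spec_get_max_even_or_odd (command : String) (list : List Int) (out : String) : Prop := out = get_max_even_or_odd_alt command list
instance (command : String) (list : List Int) (out : String) : Decidable (Spec_get_max_even_or_odd command list out) := by unfold Spec_get_max_even_or_odd; infer_instance

-- ===== CLAIM (what is proved, stated in full; the proofs are below) =====
def Claim_equal_get_max_even_or_odd : Prop := ∀ (command : String) (list : List Int), Dom_get_max_even_or_odd command list → Spec_get_max_even_or_odd command list (get_max_even_or_odd command list)

-- ===== LEMMAS AND PROOFS =====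

-- greatest index j < t with list[j] = m (as list.getD j 0), or none
def lastIdxLt (list : List Int) (m : Int) : Nat → Option Nat
  | 0 => none
  | t+1 => if list.getD t 0 = m then some t else lastIdxLt list m t

theorem lastIdxLt_append (xs ys : List Int) (m : Int) :
    ∀ t, t ≤ xs.length → lastIdxLt (xs ++ ys) m t = lastIdxLt xs m t := by
  intro t
  induction t with
  | zero => intro _; rfl
  | succ t ih =>
    intro ht
    rw [lastIdxLt, lastIdxLt, List.getD_append xs ys 0 t (by omega), ih (by omega)]

theorem lastIdxLt_isSome (list : List Int) (m : Int) :
    ∀ t (k : Nat), k < t → list.getD k 0 = m → (lastIdxLt list m t).isSome := by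
  intro t
  induction t with
  | zero => intro k hk; omega
  | succ t ih =>
    intro k hk hkm
    simp only [lastIdxLt]
    split
    · rfl
    · rename_i hne
      rcases Nat.lt_succ_iff_lt_or_eq.mp hk with h | h
      · exact ih k h hkm
      · subst h; exact absurd hkm hne

theorem scanA_eq (list : List Int) (m : Int) :
    ∀ t : Nat, t ≤ list.length →
      scanBackA list m (PySem.List.pyRange ((t : Int) - 1) (-1) (-1))
        = (lastIdxLt list m t).map (fun j => PySem.Int.toStr (j : Int)) := by
  intro t
  induction t with
  | zero =>
    intro _
    rw [PySem.List.pyRange_neg_one_eq_nil (by norm_num)]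
    rfl
  | succ t ih =>
    intro ht
    have h1 : ((t + 1 : Nat) : Int) - 1 = (t : Int) := by push_cast; ring
    rw [h1, PySem.List.pyRange_neg_one_cons (by omega)]
    show (match PySem.List.pyGet? list (t : Int) with
      | some v => if v = m then some (PySem.Int.toStr (t : Int)) else scanBackA list m (PySem.List.pyRange ((t : Int) - 1) (-1) (-1))
      | none => none) = _
    rw [PySem.List.pyGet?_natCast, List.getElem?_eq_getElem (by omega)]
    have hgd : list.getD t 0 = list[t]'(by omega) := List.getD_eq_getElem list 0 (by omega)
    simp only [lastIdxLt, hgd]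
    split
    · rfl
    · exact ih (by omega)

theorem getD_concat (xs : List Int) (x d : Int) : (xs ++ [x]).getD xs.length d = x := by
  simp [List.getD_eq_getElem?_getD]

-- stepB with the parity test abstracted into a predicate g (definitionally equal to stepB)
def stepG (g : Int → Bool) (best : Option (Int × Int)) (p : Int × Int) : Option (Int × Int) :=
  if g p.2 then
    match best with
    | none => some (p.2, p.1)
    | some b => if b.1 ≤ p.2 then some (p.2, p.1) else best
  else best

theorem foldG_char (g : Int → Bool) (list : List Int) :
    (PySem.List.enumerate list).foldl (stepG g) none
      = match PySem.List.max? (list.filter g) (fun y => y) with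
        | none => none
        | some m => some (m, ((lastIdxLt list m list.length).getD 0 : Int)) := by
  induction list using List.reverseRecOn with
  | nil => rfl
  | append_singleton xs x ih =>
    have h0 : (PySem.List.max? ([] : List Int) (fun y => y)) = none :=
      (PySem.List.max?_eq_none_iff _ _).mpr rfl
    rw [PySem.List.enumerate_append (s := 0), List.foldl_append, ih]
    simp only [PySem.List.enumerate_cons, PySem.List.enumerate_nil, List.foldl_cons,
      List.foldl_nil, List.filter_append, List.length_append, List.length_singleton]
    by_cases hgx : g x = true
    · cases hF : xs.filter g with
      | nil =>
        simp only [List.nil_append, List.filter_cons, hgx, if_true, List.filter_nil,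
          PySem.List.max?_id_cons, List.foldl_nil, h0]
        simp only [stepG, hgx, if_true, lastIdxLt, getD_concat]
        simp
      | cons h t =>
        simp only [List.cons_append, List.filter_cons, hgx, if_true, List.filter_nil,
          PySem.List.max?_id_cons, List.foldl_append, List.foldl_cons, List.foldl_nil]
        simp only [stepG, hgx, if_true]
        by_cases hmx : List.foldl max h t ≤ x
        · rw [if_pos hmx, max_eq_right hmx]
          simp only [lastIdxLt, getD_concat]
          simp
        · rw [if_neg hmx, max_eq_left (le_of_not_ge hmx)]
          have hxm : x ≠ List.foldl max h t := fun h' => hmx (le_of_eq h'.symm)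
          simp only [lastIdxLt, getD_concat, if_neg hxm,
            lastIdxLt_append xs [x] _ xs.length le_rfl]
    · have hgx' : g x = false := by simpa using hgx
      simp only [List.filter_cons, hgx', Bool.false_eq_true, if_false, List.filter_nil,
        List.append_nil]
      cases hF : xs.filter g with
      | nil =>
        simp only [h0, stepG, hgx', Bool.false_eq_true, if_false]
      | cons h t =>
        have hm := PySem.List.max?_id_cons h t
        have hmem : List.foldl max h t ∈ xs.filter g := by
          rw [hF]; exact PySem.List.max?_mem hm
        have hgm : g (List.foldl max h t) = true := (List.mem_filter.mp hmem).2
        have hxm : x ≠ List.foldl max h t := by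
          intro h'; rw [h', hgm] at hgx'; simp at hgx'
        simp only [hm, stepG, hgx', Bool.false_eq_true, if_false]
        simp only [lastIdxLt, getD_concat, if_neg hxm,
          lastIdxLt_append xs [x] _ xs.length le_rfl]

theorem foldB_char (we : Bool) (list : List Int) :
    (PySem.List.enumerate list).foldl (stepB we) none
      = match PySem.List.max? (list.filter (fun x => (PySem.Int.mod x 2 == 0) == we)) (fun y => y) with
        | none => none
        | some m => some (m, ((lastIdxLt list m list.length).getD 0 : Int)) :=
  foldG_char (fun x => (PySem.Int.mod x 2 == 0) == we) list

theorem core (we : Bool) (list : List Int) :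
    (let ev := list.filter (fun x => (PySem.Int.mod x 2 == 0) == we)
     if ev.length = 0 then "No matches"
     else (scanBackA list ((PySem.List.max? ev (fun y => y)).getD 0)
            (PySem.List.pyRange ((list.length : Int) - 1) (-1) (-1))).getD "None")
    = (match (PySem.List.enumerate list).foldl (stepB we) none with
       | none => "No matches"
       | some b => PySem.Int.toStr b.2) := by
  rw [foldB_char we list]
  cases hF : list.filter (fun x => (PySem.Int.mod x 2 == 0) == we) with
  | nil =>
    have h0 : (PySem.List.max? ([] : List Int) (fun y => y)) = none :=
      (PySem.List.max?_eq_none_iff _ _).mpr rfl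
    simp [h0]
  | cons h t =>
    have hm := PySem.List.max?_id_cons h t
    have hml : List.foldl max h t ∈ list := by
      have : List.foldl max h t ∈ list.filter (fun x => (PySem.Int.mod x 2 == 0) == we) := by
        rw [hF]; exact PySem.List.max?_mem hm
      exact (List.mem_filter.mp this).1
    obtain ⟨k, hk, hkm⟩ := List.mem_iff_getElem.mp hml
    have hgd : list.getD k 0 = List.foldl max h t := by
      rw [List.getD_eq_getElem _ _ hk, hkm]
    obtain ⟨j, hj⟩ := Option.isSome_iff_exists.mp
      (lastIdxLt_isSome list (List.foldl max h t) list.length k hk hgd)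
    simp only [hm, List.length_cons, Option.getD_some]
    rw [scanA_eq list (List.foldl max h t) list.length le_rfl, hj]
    simp

-- ===== VERDICT (by name: the statement is the Claim_ definition above) =====
theorem get_max_even_or_odd_spec : Claim_equal_get_max_even_or_odd := by
  intro command list _
  unfold Spec_get_max_even_or_odd get_max_even_or_odd get_max_even_or_odd_alt
  cases hwe : PySem.Str.isIn "even" command with
  | true =>
    
    have := core true list
    simpa using this
  | false =>
    simp only [Bool.false_eq_true, if_false]
    have := core false list
    simpa using this
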